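-- pv_equiv track=rewrite | github.com/TurnaboutHero/Vainglory_REVERSE_ENGINEERING | vg/analysis/hero_id_mapper.py | analyze_suffix_patterns
-- ===== SOURCE A (Python) =====
-- from typing import Dict, List, Tuple
--
-- def analyze_suffix_patterns(known_binary_map: Dict[int, str]) -> Dict[str, List[Tuple[int, str]]]:
--     """Group known heroes by binary ID suffix"""
--     suffix_groups = {
--         '0x00': [],  # Original release heroes
--         '0x01': [],  # Season 1-3 heroes
--         '0x03': []   # Season 4+ heroes
--     }
--
--     for binary_id, hero_name in known_binary_map.items():
--         hex_str = f"0x{binary_id:04X}"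
--         suffix = hex_str[-2:]
--
--         if suffix == '00':
--             suffix_groups['0x00'].append((binary_id, hero_name))
--         elif suffix == '01':
--             suffix_groups['0x01'].append((binary_id, hero_name))
--         elif suffix == '03':
--             suffix_groups['0x03'].append((binary_id, hero_name))
--
--     # Sort by ID
--     for key in suffix_groups:
--         suffix_groups[key].sort(key=lambda x: x[0])
--
--     return suffix_groups
-- ===== SOURCE B (Python) =====
-- from typing import Dict, List, Tuple
--
-- def analyze_suffix_patterns(known_binary_map: Dict[int, str]) -> Dict[str, List[Tuple[int, str]]]:
--     """Group known heroes by binary ID suffix, classified arithmetically.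
--
--     The two-character suffix of f"0x{id:04X}" is just abs(id) % 256 rendered in
--     hex (the sign and higher digits never reach the last two characters), so no
--     string formatting is needed: build each of the three groups directly with a
--     sorted filter over the items, one pass per group."""
--     items = list(known_binary_map.items())
--     return {key: sorted((p for p in items if abs(p[0]) % 256 == r),
--                         key=lambda p: p[0])
--             for key, r in (('0x00', 0), ('0x01', 1), ('0x03', 3))}
-- ===== Notes on version B (the rewrite author's own statement) =====
-- stated objective: alternative
-- what changed: A formats each id as a hex string, slices its two-character suffix, buckets items into mutable groups in one loop and then sorts each group; B does no string formatting at all: it classifies items by the arithmetic residue abs(id) % 256 and builds the result as a dict comprehension with one sorted-filter pass per group.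
import Mathlib
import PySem

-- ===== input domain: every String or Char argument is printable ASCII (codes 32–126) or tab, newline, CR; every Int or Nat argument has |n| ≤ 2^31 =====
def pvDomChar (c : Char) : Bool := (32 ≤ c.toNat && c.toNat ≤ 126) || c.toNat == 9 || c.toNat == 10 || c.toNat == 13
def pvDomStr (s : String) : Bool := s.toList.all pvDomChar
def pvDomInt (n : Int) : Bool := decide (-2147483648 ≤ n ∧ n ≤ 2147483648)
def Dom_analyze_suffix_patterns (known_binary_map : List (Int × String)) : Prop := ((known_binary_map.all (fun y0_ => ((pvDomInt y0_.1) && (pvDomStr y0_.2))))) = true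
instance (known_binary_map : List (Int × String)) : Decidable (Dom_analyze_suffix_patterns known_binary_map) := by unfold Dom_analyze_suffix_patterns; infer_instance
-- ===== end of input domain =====

-- B replaces A's hex-format-and-slice classification by the arithmetic residue abs(id) % 256
-- and builds the groups with one sorted-filter comprehension per key instead of A's
-- mutate-buckets-then-sort-each loop.

-- A-side helpers: the f-string f"0x{binary_id:04X}" and its [-2:] slice, ported by hand
def pyHexDigit (k : Nat) : Char := if k < 10 then Char.ofNat (48 + k) else Char.ofNat (55 + k)

def pyHexDigits (m : Nat) : List Char :=
  if m < 16 then [pyHexDigit m]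
  else pyHexDigits (m / 16) ++ [pyHexDigit (m % 16)]
decreasing_by exact Nat.div_lt_self (by omega) (by omega)

-- f"{n:04X}" : uppercase hex of |n|, zero-padded to total width 4 (sign included)
def pyFormat04X (n : Int) : List Char :=
  if n < 0 then '-' :: (List.replicate (3 - (pyHexDigits n.natAbs).length) '0' ++ pyHexDigits n.natAbs)
  else List.replicate (4 - (pyHexDigits n.natAbs).length) '0' ++ pyHexDigits n.natAbs

-- f"0x{n:04X}"[-2:]
def pySuffix (n : Int) : String :=
  PySem.Str.slice ("0x" ++ String.ofList (pyFormat04X n)) (some (-2)) none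

-- ===== PORT A =====
def analyze_suffix_patterns (known_binary_map : List (Int × String)) : List (String × List (Int × String)) :=
  let suffix_groups : PySem.Dict String (List (Int × String)) :=
    PySem.Dict.ofList [("0x00", []), ("0x01", []), ("0x03", [])]
  let suffix_groups := known_binary_map.foldl (fun g p =>
      if pySuffix p.1 = "00" then g.modify "0x00" [] (· ++ [p])
      else if pySuffix p.1 = "01" then g.modify "0x01" [] (· ++ [p])
      else if pySuffix p.1 = "03" then g.modify "0x03" [] (· ++ [p])
      else g) suffix_groups
  let suffix_groups := suffix_groups.keys.foldl (fun g k =>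
      g.modify k [] (fun l => PySem.List.sorted l (fun x => x.1))) suffix_groups
  suffix_groups.items

-- ===== PORT B =====
def analyze_suffix_patterns_alt (known_binary_map : List (Int × String)) : List (String × List (Int × String)) :=
  let items := known_binary_map
  ([(("0x00" : String), (0 : Int)), ("0x01", 1), ("0x03", 3)]).map (fun kr =>
    (kr.1, PySem.List.sorted (items.filter (fun p => PySem.Int.mod |p.1| 256 == kr.2)) (fun p => p.1)))

-- ===== PRECONDITION & SPEC =====
def Spec_analyze_suffix_patterns (known_binary_map : List (Int × String)) (out : List (String × List (Int × String))) : Prop := out = analyze_suffix_patterns_alt known_binary_map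
instance (known_binary_map : List (Int × String)) (out : List (String × List (Int × String))) : Decidable (Spec_analyze_suffix_patterns known_binary_map out) := by unfold Spec_analyze_suffix_patterns; infer_instance

-- ===== CLAIM (what is proved, stated in full; the proofs are below) =====
def Claim_equal_analyze_suffix_patterns : Prop := ∀ (known_binary_map : List (Int × String)), Dom_analyze_suffix_patterns known_binary_map → Spec_analyze_suffix_patterns known_binary_map (analyze_suffix_patterns known_binary_map)

-- ===== LEMMAS AND PROOFS =====

-- proof-only abbreviation for the three-bucket dict
def pvD3 (a0 a1 a2 : List (Int × String)) : PySem.Dict String (List (Int × String)) :=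
  PySem.Dict.ofList [("0x00", a0), ("0x01", a1), ("0x03", a2)]

theorem pvD3_mod00 (a0 a1 a2 : List (Int × String)) (f : List (Int × String) → List (Int × String)) :
    (pvD3 a0 a1 a2).modify "0x00" [] f = pvD3 (f a0) a1 a2 := rfl
theorem pvD3_mod01 (a0 a1 a2 : List (Int × String)) (f : List (Int × String) → List (Int × String)) :
    (pvD3 a0 a1 a2).modify "0x01" [] f = pvD3 a0 (f a1) a2 := rfl
theorem pvD3_mod03 (a0 a1 a2 : List (Int × String)) (f : List (Int × String) → List (Int × String)) :
    (pvD3 a0 a1 a2).modify "0x03" [] f = pvD3 a0 a1 (f a2) := rfl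
theorem pvD3_keys (a0 a1 a2 : List (Int × String)) : (pvD3 a0 a1 a2).keys = ["0x00", "0x01", "0x03"] := rfl
theorem pvD3_items (a0 a1 a2 : List (Int × String)) :
    (pvD3 a0 a1 a2).items = [("0x00", a0), ("0x01", a1), ("0x03", a2)] := rfl

-- A's bucketing loop appends each item to the bucket named by its suffix
theorem pv_foldA (l : List (Int × String)) (a0 a1 a2 : List (Int × String)) :
    l.foldl (fun g p =>
        if pySuffix p.1 = "00" then g.modify "0x00" [] (· ++ [p])
        else if pySuffix p.1 = "01" then g.modify "0x01" [] (· ++ [p])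
        else if pySuffix p.1 = "03" then g.modify "0x03" [] (· ++ [p])
        else g) (pvD3 a0 a1 a2)
    = pvD3 (a0 ++ l.filter (fun p => pySuffix p.1 == "00"))
           (a1 ++ l.filter (fun p => pySuffix p.1 == "01"))
           (a2 ++ l.filter (fun p => pySuffix p.1 == "03")) := by
  induction l generalizing a0 a1 a2 with
  | nil => simp
  | cons p l ih =>
    simp only [List.foldl_cons, List.filter_cons]
    by_cases h0 : pySuffix p.1 = "00"
    · rw [if_pos h0, pvD3_mod00, ih]
      simp [h0]
    · by_cases h1 : pySuffix p.1 = "01"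
      · rw [if_neg h0, if_pos h1, pvD3_mod01, ih]
        simp [h1]
      · by_cases h3 : pySuffix p.1 = "03"
        · rw [if_neg h0, if_neg h1, if_pos h3, pvD3_mod03, ih]
          simp [h3]
        · rw [if_neg h0, if_neg h1, if_neg h3, ih]
          simp [h0, h1, h3]

-- A's per-bucket sorting pass over the three keys
theorem pv_foldSort (a0 a1 a2 : List (Int × String)) :
    (["0x00", "0x01", "0x03"] : List String).foldl (fun g k =>
        g.modify k [] (fun l => PySem.List.sorted l (fun x => x.1))) (pvD3 a0 a1 a2)
    = pvD3 (PySem.List.sorted a0 (fun x => x.1)) (PySem.List.sorted a1 (fun x => x.1))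
           (PySem.List.sorted a2 (fun x => x.1)) := by
  simp only [List.foldl_cons, List.foldl_nil, pvD3_mod00, pvD3_mod01, pvD3_mod03]

-- pyHexDigits m ends in the digit of m % 16
theorem pv_hexDigits_last (m : Nat) : ∃ xs, pyHexDigits m = xs ++ [pyHexDigit (m % 16)] := by
  rw [pyHexDigits]
  split
  · exact ⟨[], by rw [Nat.mod_eq_of_lt ‹_›]; simp⟩
  · exact ⟨_, rfl⟩

-- the displayed string ends in the two digits of |n| % 256
theorem pv_last2 (n : Int) : ∃ xs, '0' :: 'x' :: pyFormat04X n
    = xs ++ [pyHexDigit (n.natAbs / 16 % 16), pyHexDigit (n.natAbs % 16)] := by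
  by_cases hlt : n.natAbs < 16
  · have h1 : pyHexDigits n.natAbs = [pyHexDigit n.natAbs] := by
      rw [pyHexDigits, if_pos hlt]
    have h2 : n.natAbs / 16 % 16 = 0 := by omega
    have h3 : n.natAbs % 16 = n.natAbs := Nat.mod_eq_of_lt hlt
    rw [pyFormat04X, h2, h3]
    split
    · exact ⟨['0', 'x', '-', '0'], by simp [h1, pyHexDigit, List.replicate]⟩
    · exact ⟨['0', 'x', '0', '0'], by simp [h1, pyHexDigit, List.replicate]⟩
  · obtain ⟨ys, hy⟩ := pv_hexDigits_last (n.natAbs / 16)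
    have h1 : pyHexDigits n.natAbs
        = (ys ++ [pyHexDigit (n.natAbs / 16 % 16)]) ++ [pyHexDigit (n.natAbs % 16)] := by
      rw [pyHexDigits, if_neg hlt, hy]
    rw [pyFormat04X, h1]
    split
    · exact ⟨'0' :: 'x' :: '-' ::
        (List.replicate (3 - ((ys ++ [pyHexDigit (n.natAbs / 16 % 16)]) ++ [pyHexDigit (n.natAbs % 16)]).length) '0' ++ ys), by simp⟩
    · exact ⟨'0' :: 'x' ::
        (List.replicate (4 - ((ys ++ [pyHexDigit (n.natAbs / 16 % 16)]) ++ [pyHexDigit (n.natAbs % 16)]).length) '0' ++ ys), by simp⟩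

-- the [-2:] slice is exactly the two digits of |n| % 256
theorem pv_pySuffix_eq (n : Int) :
    pySuffix n = String.ofList [pyHexDigit (n.natAbs / 16 % 16), pyHexDigit (n.natAbs % 16)] := by
  obtain ⟨xs, hx⟩ := pv_last2 n
  have hL : ("0x" ++ String.ofList (pyFormat04X n)).toList = '0' :: 'x' :: pyFormat04X n := by
    simp
  apply String.toList_inj.mp
  rw [pySuffix, PySem.Str.toList_slice, PySem.Chars.slice_eq_listSlice, hL, hx,
      PySem.List.slice_from_neg_ofNat _ 2 (by omega)]
  simp

-- decoding a digit (arguments below 16 throughout)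
theorem pv_digit_eq_iff (k r : Nat) (hk : k < 16) (hr : r < 16) :
    pyHexDigit k = pyHexDigit r ↔ k = r := by
  constructor
  · intro h
    interval_cases k <;> interval_cases r <;> first | rfl | (exfalso; revert h; decide)
  · rintro rfl; rfl

-- suffix test ↔ arithmetic residue test, for each of the three residues
theorem pv_suffix_iff (n : Int) (r : Nat) (hr : r < 256) :
    pySuffix n = String.ofList [pyHexDigit (r / 16), pyHexDigit (r % 16)]
      ↔ n.natAbs % 256 = r := by
  rw [pv_pySuffix_eq]
  constructor
  · intro h
    have h2 := congrArg String.toList h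
    rw [String.toList_ofList, String.toList_ofList] at h2
    simp only [List.cons.injEq, and_true] at h2
    have e1 := (pv_digit_eq_iff (n.natAbs / 16 % 16) (r / 16) (by omega) (by omega)).mp h2.1
    have e2 := (pv_digit_eq_iff (n.natAbs % 16) (r % 16) (by omega) (by omega)).mp h2.2
    omega
  · intro h
    have e1 : n.natAbs / 16 % 16 = r / 16 := by omega
    have e2 : n.natAbs % 16 = r % 16 := by omega
    rw [e1, e2]

-- B's residue test agrees with A's string-suffix test (r ∈ {0,1,3})
theorem pv_filter_congr (l : List (Int × String)) (ri : Int) (r : Nat) (hr : r < 256)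
    (hri : ri = (r : Int))
    (s : String) (hs : s = String.ofList [pyHexDigit (r / 16), pyHexDigit (r % 16)]) :
    l.filter (fun p => PySem.Int.mod |p.1| 256 == ri)
      = l.filter (fun p => pySuffix p.1 == s) := by
  apply List.filter_congr
  intro p _
  have habs : |p.1| = (p.1.natAbs : Int) := Int.abs_eq_natAbs p.1
  rw [habs, hri, PySem.Int.mod_eq_emod_of_pos (a := (p.1.natAbs : Int)) (by omega)]
  have hiff : ((p.1.natAbs : Int) % 256 = (r : Int)) ↔ p.1.natAbs % 256 = r := by
    omega
  by_cases h : p.1.natAbs % 256 = r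
  · simp [hs, (pv_suffix_iff p.1 r hr).mpr h]
    rw [habs]; omega
  · have hsuf : ¬ pySuffix p.1 = s := by
      rw [hs]; exact fun hc => h ((pv_suffix_iff p.1 r hr).mp hc)
    simp [hsuf]
    rw [habs]; omega

-- ===== VERDICT (by name: the statement is the Claim_ definition above) =====
theorem analyze_suffix_patterns_spec : Claim_equal_analyze_suffix_patterns := by
  intro l _
  unfold Spec_analyze_suffix_patterns
  have hA : analyze_suffix_patterns l
      = ((l.foldl (fun g p =>
            if pySuffix p.1 = "00" then g.modify "0x00" [] (· ++ [p])
            else if pySuffix p.1 = "01" then g.modify "0x01" [] (· ++ [p])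
            else if pySuffix p.1 = "03" then g.modify "0x03" [] (· ++ [p])
            else g) (pvD3 [] [] [])).keys.foldl (fun g k =>
              g.modify k [] (fun l => PySem.List.sorted l (fun x => x.1)))
          (l.foldl (fun g p =>
            if pySuffix p.1 = "00" then g.modify "0x00" [] (· ++ [p])
            else if pySuffix p.1 = "01" then g.modify "0x01" [] (· ++ [p])
            else if pySuffix p.1 = "03" then g.modify "0x03" [] (· ++ [p])
            else g) (pvD3 [] [] []))).items := rfl
  rw [hA, pv_foldA, pvD3_keys, pv_foldSort, pvD3_items]
  show _ = analyze_suffix_patterns_alt l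
  unfold analyze_suffix_patterns_alt
  simp only [List.map_cons, List.map_nil, List.nil_append]
  rw [pv_filter_congr l 0 0 (by omega) (by norm_num) "00" (by decide),
      pv_filter_congr l 1 1 (by omega) (by norm_num) "01" (by decide),
      pv_filter_congr l 3 3 (by omega) (by norm_num) "03" (by decide)]
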